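-- pv_equiv track=rewrite | github.com/sonder233/ScienceClaw | RpaClaw/backend/rpa/snapshot_compression.py | _stable_slug
-- ===== SOURCE A (Python) =====
-- from typing import Any, Dict, Iterable, List, Optional, Sequence, Tuple
--
-- def _clean_text(value: Any) -> str:
--     return " ".join(str(value or "").split())
--
-- def _stable_slug(value: Any) -> str:
--     text = _clean_text(value).lower()
--     if not text:
--         return ""
--     chars: List[str] = []
--     for char in text:
--         if char.isalnum():
--             chars.append(char)
--         elif chars and chars[-1] != "-":
--             chars.append("-")
--     slug = "".join(chars).strip("-")
--     return slug[:32]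
-- ===== SOURCE B (Python) =====
-- def _clean_text(value):
--     return " ".join(str(value or "").split())
--
--
-- def _stable_slug(value):
--     text = _clean_text(value).lower()
--     marked = "".join(c if c.isalnum() else "-" for c in text)
--     return "-".join(piece for piece in marked.split("-") if piece)[:32]
-- ===== Notes on version B (the rewrite author's own statement) =====
-- stated objective: idiomatic
-- what changed: A's single stateful loop that tracks the previous character to suppress duplicate dashes is replaced by a mark-then-split pipeline: map every non-alphanumeric character to a dash, split the marked string on the dash character, drop empty pieces, and re-join (which collapses runs and strips both ends at once), then truncate.
import Mathlib
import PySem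

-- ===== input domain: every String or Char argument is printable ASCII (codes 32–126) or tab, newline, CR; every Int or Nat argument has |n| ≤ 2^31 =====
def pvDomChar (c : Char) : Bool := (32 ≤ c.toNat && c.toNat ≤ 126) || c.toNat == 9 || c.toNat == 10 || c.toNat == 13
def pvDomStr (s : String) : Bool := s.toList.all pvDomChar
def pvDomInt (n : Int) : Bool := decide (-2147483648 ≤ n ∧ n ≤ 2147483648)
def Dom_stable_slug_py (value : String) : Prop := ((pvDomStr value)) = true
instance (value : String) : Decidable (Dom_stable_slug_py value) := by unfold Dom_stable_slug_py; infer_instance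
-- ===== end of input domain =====

-- B replaces A's stateful previous-char loop by mark-non-alnum-as-dash, split on '-', drop empty pieces, re-join (objective: simpler/idiomatic; same cost).

-- ===== PORT A =====
-- _clean_text(value) = " ".join(str(value or "").split()); on a String argument `value or ""` and str() are identity, so this is exact
def pvCleanText (s : List Char) : List Char :=
  PySem.Chars.join [' '] (PySem.Chars.split₀ s)

def stable_slug_py (value : String) : String :=
  let text := PySem.Chars.lower (pvCleanText value.toList)
  if text = [] then ""
  else
    let chars := text.foldl (fun acc char =>
      if PySem.Chars.isalnum char then acc ++ [char]
      else if acc ≠ [] ∧ acc.getLast? ≠ some '-' then acc ++ ['-']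
      else acc) []
    let slug := PySem.Chars.stripChars chars ['-']
    String.ofList (PySem.Chars.slice slug none (some 32))

-- ===== PORT B =====
def stable_slug_py_alt (value : String) : String :=
  let text := PySem.Chars.lower (pvCleanText value.toList)
  let marked := text.map (fun c => if PySem.Chars.isalnum c then c else '-')
  let parts := (PySem.Chars.splitOn marked ['-']).filter (fun p => p ≠ [])
  String.ofList ((PySem.Chars.join ['-'] parts).take 32)

-- ===== PRECONDITION & SPEC =====
def Spec_stable_slug_py (value : String) (out : String) : Prop := out = stable_slug_py_alt value
instance (value : String) (out : String) : Decidable (Spec_stable_slug_py value out) := by unfold Spec_stable_slug_py; infer_instance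

-- ===== CLAIM (what is proved, stated in full; the proofs are below) =====
def Claim_equal_stable_slug_py : Prop := ∀ (value : String), Dom_stable_slug_py value → Spec_stable_slug_py value (stable_slug_py value)

-- ===== LEMMAS AND PROOFS =====

-- the dash predicate exactly as stripChars sees it
def pvDash (c : Char) : Bool := List.contains ['-'] c

-- right-strip of dashes (what stripChars does after its left pass)
def pvRD (x : List Char) : List Char := (List.dropWhile pvDash x.reverse).reverse

-- the character marking B performs
def pvF (c : Char) : Char := if PySem.Chars.isalnum c then c else '-'

-- state machine equivalent of A's loop: the Bool is "acc is nonempty and does not end in '-'"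
def pvE : Bool → List Char → List Char
  | _, [] => []
  | b, c :: cs =>
    if PySem.Chars.isalnum c then c :: pvE true cs
    else if b then '-' :: pvE false cs else pvE b cs

-- first-word / remaining-words view of splitting on '-'
def pvSW : List Char → List Char × List (List Char)
  | [] => ([], [])
  | c :: cs => if c = '-' then ([], (pvSW cs).1 :: (pvSW cs).2)
               else (c :: (pvSW cs).1, (pvSW cs).2)

-- join of the nonempty words with single dashes
def pvJN (ws : List (List Char)) : List Char :=
  PySem.Chars.join ['-'] (ws.filter (fun p => p ≠ []))

theorem pvAlnum_ne_dash (c : Char) (h : PySem.Chars.isalnum c = true) : c ≠ '-' := by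
  intro he; subst he; exact absurd h (by decide)

theorem pvGo_eq (fuel : Nat) : ∀ (l cur : List Char) (acc : List (List Char)), l.length ≤ fuel →
    PySem.Chars.splitOn.go ['-'] fuel l cur acc
      = acc.reverse ++ (cur.reverse ++ (pvSW l).1) :: (pvSW l).2 := by
  induction fuel with
  | zero =>
    intro l cur acc h
    have hl : l = [] := by cases l <;> simp_all
    subst hl
    simp [PySem.Chars.splitOn.go, pvSW]
  | succ n ih =>
    intro l cur acc h
    cases l with
    | nil => simp [PySem.Chars.splitOn.go, pvSW]
    | cons c rest =>
      rw [PySem.Chars.splitOn.go]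
      by_cases hc : c = '-'
      · subst hc
        have hp : List.isPrefixOf ['-'] ('-' :: rest) = true := by
          simp [List.isPrefixOf]
        rw [if_pos hp]
        rw [ih _ _ _ (by simpa using Nat.le_of_succ_le_succ h)]
        simp [pvSW]
      · have hp : List.isPrefixOf ['-'] (c :: rest) = false := by
          simp [List.isPrefixOf]
          exact fun h' => hc h'.symm
        rw [if_neg (by simp [hp])]
        rw [ih _ _ _ (by simpa using Nat.le_of_succ_le_succ h)]
        simp [pvSW, hc]

theorem pvSplitOn_eq (l : List Char) :
    PySem.Chars.splitOn l ['-'] = (pvSW l).1 :: (pvSW l).2 := by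
  unfold PySem.Chars.splitOn
  rw [pvGo_eq (l.length + 1) l [] [] (by omega)]
  simp

theorem pvFold_eq (l : List Char) : ∀ (acc : List Char),
    l.foldl (fun acc char =>
      if PySem.Chars.isalnum char then acc ++ [char]
      else if acc ≠ [] ∧ acc.getLast? ≠ some '-' then acc ++ ['-']
      else acc) acc
    = acc ++ pvE (decide (acc ≠ [] ∧ acc.getLast? ≠ some '-')) l := by
  induction l with
  | nil => intro acc; simp [pvE]
  | cons c cs ih =>
    intro acc
    rw [List.foldl_cons]
    by_cases hal : PySem.Chars.isalnum c = true
    · rw [if_pos hal, ih]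
      have h1 : ((acc ++ [c]) ≠ [] ∧ (acc ++ [c]).getLast? ≠ some '-') := by
        constructor
        · simp
        · rw [List.getLast?_concat]
          intro h; exact pvAlnum_ne_dash c hal (by injection h)
      rw [decide_eq_true h1]
      simp [pvE, hal]
    · rw [if_neg hal]
      by_cases hb : (acc ≠ [] ∧ acc.getLast? ≠ some '-')
      · rw [if_pos hb, ih]
        have h2 : ¬((acc ++ ['-']) ≠ [] ∧ (acc ++ ['-']).getLast? ≠ some '-') := by
          rw [List.getLast?_concat]; simp
        rw [decide_eq_true hb, decide_eq_false h2]
        simp [pvE, hal]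
      · rw [if_neg hb, ih, decide_eq_false hb]
        conv_rhs => rw [pvE]
        simp [hal]

theorem pvRD_cons_ne (c : Char) (hc : c ≠ '-') (x : List Char) :
    pvRD (c :: x) = c :: pvRD x := by
  unfold pvRD
  rw [List.reverse_cons, List.dropWhile_append]
  cases hd : List.dropWhile pvDash x.reverse with
  | nil => simp [pvDash, hc]
  | cons a as => simp

theorem pvRD_dash_cons (x : List Char) :
    pvRD ('-' :: x) = if pvRD x = [] then [] else '-' :: pvRD x := by
  unfold pvRD
  rw [List.reverse_cons, List.dropWhile_append]
  cases hd : List.dropWhile pvDash x.reverse with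
  | nil => simp [pvDash]
  | cons a as => simp

theorem pvInterCons (a : List Char) (as : List (List Char)) :
    List.intercalate ['-'] (a :: as)
      = a ++ (if as = [] then [] else '-' :: List.intercalate ['-'] as) := by
  cases as with
  | nil => simp [List.intercalate]
  | cons b bs => simp [List.intercalate, List.intersperse]

theorem pvJN_cons_ne (w : List Char) (hw : w ≠ []) (ws : List (List Char)) :
    pvJN (w :: ws) = w ++ (if pvJN ws = [] then [] else '-' :: pvJN ws) := by
  unfold pvJN
  rw [List.filter_cons_of_pos (by simpa using hw)]
  simp only [PySem.Chars.join]
  rw [pvInterCons]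
  cases hf : List.filter (fun p => decide (p ≠ [])) ws with
  | nil => simp [List.intercalate]
  | cons a as =>
    have ha : a ≠ [] := by
      have : a ∈ List.filter (fun p => decide (p ≠ [])) ws := by rw [hf]; exact List.mem_cons_self
      simpa using List.of_mem_filter this
    have hne : List.intercalate ['-'] (a :: as) ≠ [] := by
      rw [pvInterCons]; simp [ha]
    simp [hne]

theorem pvE_false_noLeadDash (l : List Char) :
    List.dropWhile pvDash (pvE false l) = pvE false l := by
  induction l with
  | nil => simp [pvE]
  | cons c cs ih =>
    by_cases hal : PySem.Chars.isalnum c = true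
    · have hc : pvDash c = false := by
        simp [pvDash]
        exact pvAlnum_ne_dash c hal
      simp [pvE, hal, hc]
    · simpa [pvE, hal] using ih

theorem pvMain (l : List Char) :
    pvRD (pvE false l) = pvJN ((pvSW (l.map pvF)).1 :: (pvSW (l.map pvF)).2)
    ∧ pvRD (pvE true l)
      = (pvSW (l.map pvF)).1
        ++ (if pvJN (pvSW (l.map pvF)).2 = [] then []
            else '-' :: pvJN (pvSW (l.map pvF)).2) := by
  induction l with
  | nil =>
    constructor
    · simp [pvE, pvRD, pvSW, pvJN, PySem.Chars.join, List.intercalate]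
    · simp [pvE, pvRD, pvSW, pvJN, PySem.Chars.join, List.intercalate]
  | cons c cs ih =>
    obtain ⟨ih1, ih2⟩ := ih
    by_cases hal : PySem.Chars.isalnum c = true
    · have hcne : c ≠ '-' := pvAlnum_ne_dash c hal
      have hmap : (c :: cs).map pvF = c :: cs.map pvF := by simp [pvF, hal]
      have hsw : pvSW (c :: cs.map pvF)
          = (c :: (pvSW (cs.map pvF)).1, (pvSW (cs.map pvF)).2) := by
        rw [pvSW]; simp [hcne]
      have hE : pvRD (pvE false (c :: cs)) = c :: pvRD (pvE true cs) := by
        simp only [pvE, hal, if_pos]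
        exact pvRD_cons_ne c hcne _
      have hE' : pvRD (pvE true (c :: cs)) = c :: pvRD (pvE true cs) := by
        simp only [pvE, hal, if_pos]
        exact pvRD_cons_ne c hcne _
      rw [hmap, hsw]
      constructor
      · rw [hE, ih2, pvJN_cons_ne _ (by simp) _]
        simp
      · rw [hE', ih2]
        simp
    · have hmap : (c :: cs).map pvF = '-' :: cs.map pvF := by simp [pvF, hal]
      have hsw : pvSW ('-' :: cs.map pvF)
          = ([], (pvSW (cs.map pvF)).1 :: (pvSW (cs.map pvF)).2) := by
        rw [pvSW]; simp
      rw [hmap, hsw]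
      constructor
      · have hE : pvE false (c :: cs) = pvE false cs := by simp [pvE, hal]
        rw [hE, ih1]
        simp [pvJN]
      · have hE : pvE true (c :: cs) = '-' :: pvE false cs := by simp [pvE, hal]
        rw [hE, pvRD_dash_cons, ih1]
        simp [pvJN]

-- the two truncation arguments coincide: A's stripped slug IS B's joined word list
theorem pvSlug_eq (l : List Char) :
    PySem.Chars.stripChars
      (l.foldl (fun acc char =>
        if PySem.Chars.isalnum char then acc ++ [char]
        else if acc ≠ [] ∧ acc.getLast? ≠ some '-' then acc ++ ['-']
        else acc) []) ['-']
    = PySem.Chars.join ['-']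
        ((PySem.Chars.splitOn (l.map (fun c => if PySem.Chars.isalnum c then c else '-')) ['-']).filter
          (fun p => p ≠ [])) := by
  have hmap : l.map (fun c => if PySem.Chars.isalnum c then c else '-') = l.map pvF := rfl
  rw [hmap, pvSplitOn_eq]
  have hfold := pvFold_eq l []
  simp only [ne_eq, not_true_eq_false, false_and, decide_false, List.nil_append] at hfold
  rw [hfold]
  show pvRD (List.dropWhile pvDash (pvE false l)) = pvJN _
  rw [pvE_false_noLeadDash]
  exact (pvMain l).1

-- ===== VERDICT (by name: the statement is the Claim_ definition above) =====
theorem stable_slug_py_spec : Claim_equal_stable_slug_py := by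
  intro value _
  unfold Spec_stable_slug_py stable_slug_py stable_slug_py_alt
  set l := PySem.Chars.lower (pvCleanText value.toList) with hl
  by_cases h : l = []
  · rw [if_pos h, h]
    simp [pvSplitOn_eq, pvSW, PySem.Chars.join, List.intercalate]
  · rw [if_neg h]
    simp only []
    have hslice : ∀ s : List Char, PySem.Chars.slice s none (some 32) = s.take 32 := by
      intro s
      rw [PySem.Chars.slice_eq_listSlice, PySem.List.slice_to s (by norm_num)]
      rfl
    rw [hslice]
    exact congrArg String.ofList (congrArg (List.take 32) (pvSlug_eq l))
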